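-- pv_equiv track=rewrite | github.com/ldct/cp | codeforces/611/B/B.py | count
-- ===== SOURCE A (Python) =====
-- import sys, itertools
--
-- def exactlyOneZero():
--     for totalLength in itertools.count(1):
--         for leftOnes in range(1, totalLength):
--             rightOnes = totalLength - leftOnes - 1
--
--             s = "1"*leftOnes + "0" +  "1"*rightOnes
--             yield int(s, 2)
--
-- def count(a, b):
--     ret = 0
--     for i in exactlyOneZero():
--         if i < a:
--             continue
--         if i > b:
--             return ret
--         ret += 1
-- ===== SOURCE B (Python) =====
-- def _g(x):
--     # number of integers <= x whose binary form is 1^k 0 1^m (exactly one zero bit)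
--     if x < 2:
--         return 0
--     L = x.bit_length()
--     full = sum(Lp - 1 for Lp in range(2, L))
--     top = sum(1 for p in range(L - 1) if (1 << L) - 1 - (1 << p) <= x)
--     return full + top
--
-- def count(a, b):
--     if a > b:
--         return 0
--     return _g(b) - _g(a - 1)
-- ===== Notes on version B (the rewrite author's own statement) =====
-- stated objective: alternative
-- what changed: A enumerates every qualifying number ('1^k 0 1^m') in increasing order and counts those in [a,b] with an early stop; B instead computes count(a,b) = g(b) - g(a-1) where g(x) counts qualifying numbers <= x in bulk: a closed count per full bit-length plus a per-position scan of the top bit-length only.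
import Mathlib
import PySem

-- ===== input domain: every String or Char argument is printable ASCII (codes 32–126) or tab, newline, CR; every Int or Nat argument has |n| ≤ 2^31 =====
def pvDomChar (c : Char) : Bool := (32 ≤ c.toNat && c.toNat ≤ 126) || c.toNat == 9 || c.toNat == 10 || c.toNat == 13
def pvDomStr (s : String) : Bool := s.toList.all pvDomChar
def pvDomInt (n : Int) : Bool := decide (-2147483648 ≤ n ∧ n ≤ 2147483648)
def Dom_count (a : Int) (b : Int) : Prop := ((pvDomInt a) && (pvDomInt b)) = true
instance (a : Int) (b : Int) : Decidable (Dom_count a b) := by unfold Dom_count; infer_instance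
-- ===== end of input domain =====

-- B replaces A's enumerate-and-early-stop over the infinite qualifying sequence by a
-- closed-style prefix count g with count = g(b) - g(a-1) (objective: alternative algorithm).

-- ===== PORT A =====
-- exact port of int(s, 2) for strings made only of binary digits '0'/'1'
def parseBin (s : List Char) : Int :=
  s.foldl (fun acc c => 2 * acc + (if c = '1' then 1 else 0)) 0

-- the inner `for leftOnes in range(1, totalLength)` loop of the generator:
-- the values yielded at a given totalLength, in yield order
def lenVals (L : Nat) : List Int :=
  (List.range' 1 (L - 1)).map (fun k =>
    parseBin (List.replicate k '1' ++ '0' :: List.replicate (L - k - 1) '1'))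

-- body of A's loop; Sum.inl = `return ret` has fired, Sum.inr = running ret
def stepA (a b : Int) (st : Int ⊕ Int) (i : Int) : Int ⊕ Int :=
  match st with
  | .inl r => .inl r
  | .inr r => if i < a then .inr r else if i > b then .inl r else .inr (r + 1)

-- fuel guard for totality only: beyond b.toNat.size + 2 totalLengths every
-- generated value exceeds b, so the Python loop has returned by then
def count (a : Int) (b : Int) : Int :=
  -- fuel = b.toNat.size + 2
  match ((List.range (b.toNat.size + 2)).flatMap (fun i => lenVals (i + 1))).foldl (stepA a b) (.inr 0) with
  | .inl r => r
  | .inr r => r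

-- ===== PORT B =====
-- port of Source B's _g: how many qualifying integers are ≤ x
def gCount (x : Int) : Int :=
  if x < 2 then 0 else
    let L := x.toNat.size
    let full := ((List.range' 2 (L - 2)).map (fun (Lp : Nat) => (Lp : Int) - 1)).sum
    let top := ((List.range (L - 1)).filter (fun p => 2 ^ L - 1 - 2 ^ p ≤ x)).length
    full + (top : Int)

def count_alt (a : Int) (b : Int) : Int :=
  if a > b then 0 else gCount b - gCount (a - 1)

-- ===== PRECONDITION & SPEC =====
def Spec_count (a : Int) (b : Int) (out : Int) : Prop := out = count_alt a b
instance (a : Int) (b : Int) (out : Int) : Decidable (Spec_count a b out) := by unfold Spec_count; infer_instance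

-- ===== CLAIM (what is proved, stated in full; the proofs are below) =====
def Claim_equal_count : Prop := ∀ (a : Int) (b : Int), Dom_count a b → Spec_count a b (count a b)

-- ===== LEMMAS AND PROOFS =====

-- A's generator is the concatenation of these per-length blocks:
-- all values yielded at totalLengths 1..N, in yield order
def V (N : Nat) : List Int := (List.range N).flatMap (fun i => lenVals (i + 1))

-- the "either a return fired (inl) or the loop is still running (inr)" extractor
def unE : Int ⊕ Int → Int
  | .inl r => r
  | .inr r => r

theorem parseBin_ones (n : Nat) (acc : Int) :
    (List.replicate n '1').foldl (fun acc c => 2 * acc + (if c = '1' then 1 else 0)) acc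
      = acc * 2 ^ n + (2 ^ n - 1) := by
  induction n generalizing acc with
  | zero => simp
  | succ n ih =>
      rw [List.replicate_succ, List.foldl_cons, ih,
        show (if ('1':Char) = '1' then (1:Int) else 0) = 1 from by decide]
      ring

theorem parseBin_val (k r : Nat) :
    parseBin (List.replicate k '1' ++ '0' :: List.replicate r '1')
      = 2 ^ (k + r + 1) - 2 ^ r - 1 := by
  unfold parseBin
  rw [List.foldl_append, parseBin_ones, List.foldl_cons,
    show (if ('0':Char) = '1' then (1:Int) else 0) = 0 from by decide, parseBin_ones]
  rw [pow_add, pow_succ]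
  ring

theorem mem_lenVals {L : Nat} {v : Int} (hv : v ∈ lenVals L) :
    2 ≤ L ∧ (2:Int) ^ (L - 1) ≤ v ∧ v ≤ 2 ^ L - 2 := by
  unfold lenVals at hv
  rw [List.mem_map] at hv
  obtain ⟨k, hk, rfl⟩ := hv
  rw [List.mem_range'_1] at hk
  have hL : 2 ≤ L := by omega
  rw [parseBin_val, show k + (L - k - 1) + 1 = L by omega]
  have hp1 : (2:Int) ^ (L - k - 1) ≤ 2 ^ (L - 2) :=
    pow_le_pow_right₀ (by norm_num) (by omega)
  have hp2 : (1:Int) ≤ 2 ^ (L - k - 1) := one_le_pow₀ (by norm_num)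
  have hp3 : (2:Int) ^ (L - 1) = 2 * 2 ^ (L - 2) := by
    rw [← pow_succ']; congr 1; omega
  have hp4 : (2:Int) ^ L = 2 * 2 ^ (L - 1) := by
    rw [← pow_succ']; congr 1; omega
  have hp5 : (1:Int) ≤ 2 ^ (L - 2) := one_le_pow₀ (by norm_num)
  refine ⟨hL, by linarith, by linarith⟩

theorem pairwise_lenVals (L : Nat) : (lenVals L).Pairwise (· ≤ ·) := by
  unfold lenVals
  refine List.Pairwise.map _ ?_ (List.pairwise_lt_range' 1)
  intro k k' hkk'
  rw [parseBin_val, parseBin_val]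
  have h1 : (2:Int) ^ (L - k' - 1) ≤ 2 ^ (L - k - 1) :=
    pow_le_pow_right₀ (by norm_num) (by omega)
  have h2 : (2:Int) ^ (k + (L - k - 1) + 1) ≤ 2 ^ (k' + (L - k' - 1) + 1) :=
    pow_le_pow_right₀ (by norm_num) (by omega)
  linarith

theorem V_succ (N : Nat) : V (N + 1) = V N ++ lenVals (N + 1) := by
  unfold V
  rw [List.range_succ, List.flatMap_append]
  simp

theorem mem_V {N : Nat} {v : Int} (h : v ∈ V N) : 2 ≤ v ∧ v ≤ 2 ^ N - 2 := by
  unfold V at h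
  rw [List.mem_flatMap] at h
  obtain ⟨i, hi, hv⟩ := h
  rw [List.mem_range] at hi
  obtain ⟨hL, hlo, hhi⟩ := mem_lenVals hv
  have h1 : (2:Int) ≤ 2 ^ (i + 1 - 1) := by
    calc (2:Int) = 2 ^ 1 := (pow_one 2).symm
    _ ≤ 2 ^ (i + 1 - 1) := pow_le_pow_right₀ (by norm_num) (by omega)
  have h2 : (2:Int) ^ (i + 1) ≤ 2 ^ N := pow_le_pow_right₀ (by norm_num) (by omega)
  exact ⟨by linarith, by linarith⟩

theorem pairwise_V (N : Nat) : (V N).Pairwise (· ≤ ·) := by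
  induction N with
  | zero => unfold V; simp
  | succ N ih =>
      rw [V_succ, List.pairwise_append]
      refine ⟨ih, pairwise_lenVals _, ?_⟩
      intro v hv w hw
      obtain ⟨_, hv2⟩ := mem_V hv
      obtain ⟨hL, hlo, _⟩ := mem_lenVals hw
      simp only [Nat.add_sub_cancel] at hlo
      linarith

theorem foldl_stepA_inl (a b : Int) (l : List Int) (r : Int) :
    l.foldl (stepA a b) (.inl r) = .inl r := by
  induction l with
  | nil => rfl
  | cons v t ih => simpa [stepA] using ih

theorem fold_count (a b : Int) :
    ∀ l : List Int, l.Pairwise (· ≤ ·) → ∀ r : Int,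
      unE (l.foldl (stepA a b) (.inr r))
        = r + (l.countP (fun v => decide (a ≤ v ∧ v ≤ b)) : Int) := by
  intro l
  induction l with
  | nil => intro _ r; simp [unE]
  | cons v t ih =>
      intro hl r
      rw [List.pairwise_cons] at hl
      obtain ⟨hv, ht⟩ := hl
      rw [List.foldl_cons]
      by_cases h1 : v < a
      · rw [show stepA a b (.inr r) v = .inr r by simp [stepA, h1], ih ht r,
            List.countP_cons_of_neg]
        simp only [decide_eq_true_eq, not_and]
        intro hav
        omega
      · by_cases h2 : v > b
        · rw [show stepA a b (.inr r) v = .inl r by simp [stepA, h1, h2],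
              foldl_stepA_inl]
          have h0 : t.countP (fun v => decide (a ≤ v ∧ v ≤ b)) = 0 := by
            rw [List.countP_eq_zero]
            intro w hw
            have := hv w hw
            simp only [decide_eq_true_eq, not_and]
            intro _
            omega
          rw [List.countP_cons_of_neg, h0]
          · simp [unE]
          · simp only [decide_eq_true_eq, not_and]
            intro _
            omega
        · rw [show stepA a b (.inr r) v = .inr (r + 1) by simp [stepA, h1, h2],
              ih ht (r + 1), List.countP_cons_of_pos]
          · push_cast
            ring
          · simp only [decide_eq_true_eq]
            omega

theorem count_eq_cnt (a b : Int) :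
    count a b = (((V (b.toNat.size + 2)).countP (fun v => decide (a ≤ v ∧ v ≤ b))) : Int) := by
  have h : count a b = unE ((V (b.toNat.size + 2)).foldl (stepA a b) (.inr 0)) := by
    unfold count V unE
    cases ((List.range (b.toNat.size + 2)).flatMap (fun i => lenVals (i + 1))).foldl
        (stepA a b) (Sum.inr 0) <;> rfl
  rw [h, fold_count a b _ (pairwise_V _) 0, zero_add]

-- ===== B side =====

theorem countP_lenVals_zero {L : Nat} {x : Int} (h : x < 2 ^ (L - 1)) :
    (lenVals L).countP (fun v => decide (v ≤ x)) = 0 := by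
  rw [List.countP_eq_zero]
  intro v hv
  obtain ⟨_, hlo, _⟩ := mem_lenVals hv
  simp only [decide_eq_true_eq]
  omega

theorem countP_lenVals_full {L : Nat} {x : Int} (h : (2:Int) ^ L - 2 ≤ x) :
    (lenVals L).countP (fun v => decide (v ≤ x)) = L - 1 := by
  have hlen : (lenVals L).length = L - 1 := by
    unfold lenVals
    rw [List.length_map, List.length_range']
  rw [← hlen, List.countP_eq_length]
  intro v hv
  obtain ⟨_, _, hhi⟩ := mem_lenVals hv
  simp only [decide_eq_true_eq]
  omega

theorem countP_rev {α : Type} (p : α → Bool) (l : List α) :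
    l.reverse.countP p = l.countP p := by
  rw [List.countP_eq_length_filter, List.countP_eq_length_filter,
      List.filter_reverse, List.length_reverse]

theorem countP_lenVals_top (L : Nat) (hL : 2 ≤ L) (x : Int) :
    (lenVals L).countP (fun v => decide (v ≤ x))
      = ((List.range (L - 1)).filter (fun p => decide ((2:Int) ^ L - 1 - 2 ^ p ≤ x))).length := by
  rw [← List.countP_eq_length_filter]
  unfold lenVals
  rw [List.countP_map]
  rw [List.countP_congr (q := fun k => decide ((2:Int) ^ L - 1 - 2 ^ (L - 1 - k) ≤ x))
      (by
        intro k hk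
        rw [List.mem_range'_1] at hk
        simp only [Function.comp_apply, parseBin_val, decide_eq_true_eq,
          show L - k - 1 = L - 1 - k by omega, show k + (L - 1 - k) + 1 = L by omega]
        constructor <;> (intro; linarith))]
  rw [← countP_rev _ (List.range' 1 (L - 1)), List.reverse_range', List.countP_map]
  apply List.countP_congr
  intro i hi
  rw [List.mem_range] at hi
  simp only [Function.comp_apply, decide_eq_true_eq]
  rw [show L - 1 - (1 + (L - 1) - 1 - i) = i by omega]

theorem countP_V_succ (p : Int → Bool) (N : Nat) :
    (V (N + 1)).countP p = (V N).countP p + (lenVals (N + 1)).countP p := by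
  rw [V_succ, List.countP_append]

theorem countP_V_full (x : Int) :
    ∀ M : Nat, (2:Int) ^ (M + 1) - 2 ≤ x →
      (((V (M + 1)).countP (fun v => decide (v ≤ x))) : Int)
        = ((List.range' 2 M).map (fun (Lp : Nat) => (Lp : Int) - 1)).sum := by
  intro M
  induction M with
  | zero =>
      intro _
      have h1 : V 1 = [] := rfl
      simp [h1]
  | succ M ih =>
      intro h
      have hM : (2:Int) ^ (M + 1) - 2 ≤ x := by
        have : (2:Int) ^ (M + 1) ≤ 2 ^ (M + 1 + 1) := pow_le_pow_right₀ (by norm_num) (by omega)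
        linarith
      rw [countP_V_succ]
      push_cast
      rw [ih hM, countP_lenVals_full (L := M + 1 + 1) h, List.range'_concat]
      rw [List.map_append, List.sum_append]
      push_cast
      simp
      ring

theorem gCount_eq (x : Int) :
    ∀ N : Nat, x.toNat.size ≤ N →
      gCount x = (((V N).countP (fun v => decide (v ≤ x))) : Int) := by
  intro N
  induction N with
  | zero =>
      intro hN
      have hx : x < 2 := by
        rcases le_or_gt 2 x with h | h
        · exfalso
          have : 2 ≤ x.toNat := by omega
          have : 1 < x.toNat.size := Nat.lt_size.mpr (by simpa using this)
          omega
        · exact h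
      rw [gCount, if_pos hx]
      simp [V]
  | succ N ih =>
      intro hN
      by_cases hsz : x.toNat.size ≤ N
      · rw [ih hsz, countP_V_succ]
        have h0 : (lenVals (N + 1)).countP (fun v => decide (v ≤ x)) = 0 := by
          apply countP_lenVals_zero
          simp only [Nat.add_sub_cancel]
          rcases le_or_gt 0 x with hx0 | hx0
          · have h1 : x.toNat < 2 ^ x.toNat.size := Nat.lt_size_self _
            have h2 : (2:Nat) ^ x.toNat.size ≤ 2 ^ N := Nat.pow_le_pow_right (by norm_num) hsz
            have h3 : (x.toNat : Int) = x := Int.toNat_of_nonneg hx0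
            have h4 : ((2:Nat) ^ N : Int) = (2:Int) ^ N := by push_cast; rfl
            omega
          · have : (0:Int) < 2 ^ N := by positivity
            omega
        rw [h0]
        simp
      · -- the top length: x.toNat.size = N + 1
        have hsize : x.toNat.size = N + 1 := by omega
        by_cases hx : x < 2
        · have htn : x.toNat ≤ 1 := by omega
          have : x.toNat.size ≤ 1 := by
            rw [Nat.size_le]
            omega
          have hN1 : N = 0 := by omega
          subst hN1
          rw [gCount, if_pos hx]
          have : V 1 = [] := rfl
          simp [this]
        · have hx2 : 2 ≤ x := by omega
          have hx0 : (0:Int) ≤ x := by omega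
          have htn : 2 ≤ x.toNat := by omega
          have hN1 : 1 ≤ N := by
            have : 1 < x.toNat.size := Nat.lt_size.mpr (by simpa using htn)
            omega
          obtain ⟨N', rfl⟩ : ∃ N', N = N' + 1 := ⟨N - 1, by omega⟩
          have hfull : (2:Int) ^ (N' + 1) - 2 ≤ x := by
            have h1 : (2:Nat) ^ (N' + 1) ≤ x.toNat := Nat.lt_size.mp (by omega)
            have h3 : (x.toNat : Int) = x := Int.toNat_of_nonneg hx0
            have h4 : ((2:Nat) ^ (N' + 1) : Int) = (2:Int) ^ (N' + 1) := by push_cast; rfl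
            omega
          rw [gCount, if_neg (by omega)]
          rw [countP_V_succ]
          push_cast
          rw [countP_V_full x N' hfull,
              countP_lenVals_top (N' + 1 + 1) (by omega) x]
          simp only [hsize]
          rw [show N' + 1 + 1 - 2 = N' by omega, show N' + 1 + 1 - 1 = N' + 1 by omega]

theorem cnt_diff (a b : Int) (hab : a ≤ b) (l : List Int) :
    (l.countP (fun v => decide (a ≤ v ∧ v ≤ b)) : Int)
      = (l.countP (fun v => decide (v ≤ b)) : Int)
        - (l.countP (fun v => decide (v ≤ a - 1)) : Int) := by
  induction l with
  | nil => simp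
  | cons v t ih =>
      simp only [List.countP_cons]
      push_cast
      split_ifs with h1 h2 h3 h2 h3 h3 h3 <;>
        simp only [decide_eq_true_eq] at * <;> omega

theorem alt_eq_cnt (a b : Int) :
    count_alt a b = (((V (b.toNat.size + 2)).countP (fun v => decide (a ≤ v ∧ v ≤ b))) : Int) := by
  unfold count_alt
  by_cases hab : a > b
  · rw [if_pos hab]
    have h0 : (V (b.toNat.size + 2)).countP (fun v => decide (a ≤ v ∧ v ≤ b)) = 0 := by
      rw [List.countP_eq_zero]
      intro v _
      simp only [decide_eq_true_eq, not_and]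
      intro _
      omega
    rw [h0]
    rfl
  · rw [if_neg hab]
    have hab' : a ≤ b := by omega
    have hsz : (a - 1).toNat.size ≤ b.toNat.size + 2 :=
      le_trans (Nat.size_le_size (Int.toNat_le_toNat (show a - 1 ≤ b by omega))) (by omega)
    rw [gCount_eq b (b.toNat.size + 2) (by omega),
        gCount_eq (a - 1) (b.toNat.size + 2) hsz,
        cnt_diff a b hab']

-- ===== VERDICT (by name: the statement is the Claim_ definition above) =====
theorem count_spec : Claim_equal_count := by
  intro a b _
  unfold Spec_count
  rw [count_eq_cnt, alt_eq_cnt]
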